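-- pv_equiv track=rewrite | github.com/specpulse/specpulse | specpulse/core/validator.py | _add_section_to_spec
-- ===== SOURCE A (Python) =====
-- def _add_section_to_spec(content: str, section_name: str, section_template: str) -> str:
--     """
--     Add a section to specification content in the appropriate location.
--
--     Sections are added in a logical order, not just appended to the end.
--
--     Args:
--         content: Current specification content
--         section_name: Name of section to add
--         section_template: Template content for the section
--
--     Returns:
--         Modified content with section added
--     """
--     # Define section order for insertion
--     section_order = [
--         "Metadata",
--         "Executive Summary",
--         "Problem Statement",
--         "Proposed Solution",
--         "Detailed Requirements",
--         "Functional Requirements",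
--         "Non-Functional Requirements",
--         "User Stories",
--         "Acceptance Criteria",
--         "Technical Constraints",
--         "Dependencies",
--         "Risks and Mitigations",
--         "Success Criteria",
--         "Open Questions",
--         "Appendix"
--     ]
--
--     # Find insertion point
--     lines = content.split("\n")
--     insertion_index = len(lines)  # Default: append to end
--
--     # Try to find the best insertion point based on section order
--     section_index = section_order.index(section_name) if section_name in section_order else -1
--
--     if section_index >= 0:
--         # Find the section that should come after this one
--         for i in range(section_index + 1, len(section_order)):
--             next_section = section_order[i]
--             marker = f"## {next_section}"
--
--             for line_num, line in enumerate(lines):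
--                 if line.strip() == marker:
--                     insertion_index = line_num
--                     break
--
--             if insertion_index < len(lines):
--                 break
--
--     # Insert the section
--     lines.insert(insertion_index, "")
--     lines.insert(insertion_index + 1, section_template)
--     lines.insert(insertion_index + 2, "")
--
--     return "\n".join(lines)
-- ===== SOURCE B (Python) =====
-- def _add_section_to_spec(content: str, section_name: str, section_template: str) -> str:
--     """Add a section at its ordered position.
--
--     Instead of searching section-by-section, map each later section's marker to
--     its priority rank, then select in ONE pass over the lines the line whose
--     marker has the lexicographically smallest (rank, line_number) pair; insert
--     the block there (or append if no later section occurs).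
--     """
--     section_order = [
--         "Metadata",
--         "Executive Summary",
--         "Problem Statement",
--         "Proposed Solution",
--         "Detailed Requirements",
--         "Functional Requirements",
--         "Non-Functional Requirements",
--         "User Stories",
--         "Acceptance Criteria",
--         "Technical Constraints",
--         "Dependencies",
--         "Risks and Mitigations",
--         "Success Criteria",
--         "Open Questions",
--         "Appendix",
--     ]
--
--     lines = content.split("\n")
--
--     if section_name in section_order:
--         pos = section_order.index(section_name)
--         rank = {"## " + s: r for r, s in enumerate(section_order[pos + 1:])}
--     else:
--         rank = {}
--
--     best = None  # lexicographically minimal (rank, line_number) of any later marker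
--     for i, line in enumerate(lines):
--         r = rank.get(line.strip())
--         if r is not None and (best is None or (r, i) < best):
--             best = (r, i)
--
--     idx = len(lines) if best is None else best[1]
--     return "\n".join(lines[:idx] + ["", section_template, ""] + lines[idx:])
-- ===== Notes on version B (the rewrite author's own statement) =====
-- stated objective: alternative
-- what changed: A searches section-by-section, rescanning all lines for each later section until one is found; B inverts the traversal: it builds a marker->priority-rank dict once and makes a single pass over the lines selecting the lexicographically minimal (rank, line_number) pair, which picks the same insertion point; the three list.insert calls become one take/drop splice.
import Mathlib
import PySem

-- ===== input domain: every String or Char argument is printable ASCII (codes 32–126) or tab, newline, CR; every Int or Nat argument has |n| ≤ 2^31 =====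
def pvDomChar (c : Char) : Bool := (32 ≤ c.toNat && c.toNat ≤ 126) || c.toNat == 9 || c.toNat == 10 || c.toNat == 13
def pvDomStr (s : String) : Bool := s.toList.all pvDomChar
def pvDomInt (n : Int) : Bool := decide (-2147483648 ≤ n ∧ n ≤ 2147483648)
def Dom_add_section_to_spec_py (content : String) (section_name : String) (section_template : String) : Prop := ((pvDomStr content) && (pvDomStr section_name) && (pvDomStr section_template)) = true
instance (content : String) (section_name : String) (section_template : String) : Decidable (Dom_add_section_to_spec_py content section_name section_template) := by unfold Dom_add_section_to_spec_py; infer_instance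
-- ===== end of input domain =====

-- B replaces A's section-by-section rescan of the lines by a marker→rank dict and ONE pass
-- over the lines selecting the minimal (rank, line number) pair (objective: alternative).

-- the fixed section order, shared verbatim by both programs
def pvSectionOrder : List String :=
  ["Metadata", "Executive Summary", "Problem Statement", "Proposed Solution",
   "Detailed Requirements", "Functional Requirements", "Non-Functional Requirements",
   "User Stories", "Acceptance Criteria", "Technical Constraints", "Dependencies",
   "Risks and Mitigations", "Success Criteria", "Open Questions", "Appendix"]

-- ===== PORT A =====
-- A's inner loop: first line whose strip() equals the marker (enumerate counter n)
def pvScanLines : List String → String → Nat → Option Nat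
  | [], _, _ => none
  | l :: rest, marker, n =>
    if PySem.Str.strip l = marker then some n else pvScanLines rest marker (n + 1)

-- A's outer loop over the sections after section_name, carrying insertion_index
def pvOuterA (lines : List String) : List String → Nat → Nat
  | [], idx => idx
  | sec :: rest, idx =>
    let idx' := match pvScanLines lines ("## " ++ sec) 0 with
      | some n => n
      | none => idx
    if idx' < lines.length then idx' else pvOuterA lines rest idx'

def add_section_to_spec_py (content : String) (section_name : String) (section_template : String) : String :=
  let lines := (PySem.Str.split? content "\n").getD []   -- sep "\n" ≠ "": split? is always some
  let idx :=
    match PySem.List.index? pvSectionOrder section_name with  -- index if present else -1; if -1 the loop is skipped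
    | none => lines.length
    | some si => pvOuterA lines (pvSectionOrder.drop (si + 1)) lines.length
  let lines1 := PySem.List.insert lines (idx : Int) ""
  let lines2 := PySem.List.insert lines1 ((idx : Int) + 1) section_template
  let lines3 := PySem.List.insert lines2 ((idx : Int) + 2) ""
  PySem.Str.join "\n" lines3

-- ===== PORT B =====
-- B's rank dict: {"## " + s: r for r, s in enumerate(...)} (keys fresh, ranks from r upward)
def pvBuildRank : List String → Nat → PySem.Dict String Nat → PySem.Dict String Nat
  | [], _, d => d
  | s :: rest, r, d => pvBuildRank rest (r + 1) (d.insert ("## " ++ s) r)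

-- Python tuple comparison (r, i) < b on Nat pairs
def pvLexLt (p q : Nat × Nat) : Bool := p.1 < q.1 || (p.1 == q.1 && p.2 < q.2)

-- B's single pass: keep the lexicographically minimal (rank, line number)
def pvBestScan (rank : PySem.Dict String Nat) : List String → Nat → Option (Nat × Nat) → Option (Nat × Nat)
  | [], _, best => best
  | l :: rest, i, best =>
    let best' :=
      match rank.get? (PySem.Str.strip l) with
      | none => best
      | some r =>
        match best with
        | none => some (r, i)
        | some b => if pvLexLt (r, i) b then some (r, i) else best
    pvBestScan rank rest (i + 1) best'

def add_section_to_spec_py_alt (content : String) (section_name : String) (section_template : String) : String :=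
  let lines := (PySem.Str.split? content "\n").getD []   -- sep "\n" ≠ "": split? is always some
  let rank :=
    match PySem.List.index? pvSectionOrder section_name with
    | none => PySem.Dict.empty
    | some pos => pvBuildRank (pvSectionOrder.drop (pos + 1)) 0 PySem.Dict.empty
  let idx :=
    match pvBestScan rank lines 0 none with
    | none => lines.length
    | some b => b.2
  PySem.Str.join "\n" (lines.take idx ++ ["", section_template, ""] ++ lines.drop idx)

-- ===== PRECONDITION & SPEC =====
def Spec_add_section_to_spec_py (content : String) (section_name : String) (section_template : String) (out : String) : Prop := out = add_section_to_spec_py_alt content section_name section_template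
instance (content : String) (section_name : String) (section_template : String) (out : String) : Decidable (Spec_add_section_to_spec_py content section_name section_template out) := by unfold Spec_add_section_to_spec_py; infer_instance

-- ===== CLAIM (what is proved, stated in full; the proofs are below) =====
def Claim_equal_add_section_to_spec_py : Prop := ∀ (content : String) (section_name : String) (section_template : String), Dom_add_section_to_spec_py content section_name section_template → Spec_add_section_to_spec_py content section_name section_template (add_section_to_spec_py content section_name section_template)

-- ===== LEMMAS AND PROOFS =====

-- the "hit list" of B's scan: every (rank of marker, line number) pair, in line order
def pvHits (rank : PySem.Dict String Nat) : List String → Nat → List (Nat × Nat)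
  | [], _ => []
  | l :: rest, i =>
    (match rank.get? (PySem.Str.strip l) with
     | some r => [(r, i)]
     | none => []) ++ pvHits rank rest (i + 1)

-- B's accumulator step, isolated
def pvStep (best : Option (Nat × Nat)) (p : Nat × Nat) : Option (Nat × Nat) :=
  match best with
  | none => some p
  | some b => if pvLexLt p b then some p else some b

-- first marker position in a section list, ranks counted from b
def pvFindRank : List String → Nat → String → Option Nat
  | [], _, _ => none
  | s :: rest, b, k => if ("## " ++ s) = k then some b else pvFindRank rest (b + 1) k

lemma pvLexLt_true (p q : Nat × Nat) :
    pvLexLt p q = true ↔ p.1 < q.1 ∨ (p.1 = q.1 ∧ p.2 < q.2) := by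
  simp [pvLexLt]

lemma pvLexLt_false (p q : Nat × Nat) :
    pvLexLt p q = false ↔ q.1 ≤ p.1 ∧ (p.1 = q.1 → q.2 ≤ p.2) := by
  rw [← Bool.not_eq_true, pvLexLt_true]; omega

-- B's pass is the fold of pvStep over the hit list
lemma pvBestScan_eq_fold (rank : PySem.Dict String Nat) (lines : List String) :
    ∀ (i : Nat) (best : Option (Nat × Nat)),
      pvBestScan rank lines i best = List.foldl pvStep best (pvHits rank lines i) := by
  induction lines with
  | nil => intro i best; rfl
  | cons l rest ih =>
    intro i best
    simp only [pvBestScan, pvHits]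
    rcases h : rank.get? (PySem.Str.strip l) with _ | r
    · simp [ih]
    · rcases best with _ | b
      · simp [ih, pvStep]
      · simp only [List.singleton_append, List.foldl_cons, pvStep]
        rw [ih]

-- the fold of pvStep from some b returns some minimum
lemma pvFold_some (hs : List (Nat × Nat)) : ∀ (b : Nat × Nat),
    ∃ p, List.foldl pvStep (some b) hs = some p ∧ (p = b ∨ p ∈ hs) ∧
      pvLexLt b p = false ∧ ∀ q ∈ hs, pvLexLt q p = false := by
  induction hs with
  | nil =>
    intro b
    exact ⟨b, rfl, Or.inl rfl, by rw [pvLexLt_false]; omega, by simp⟩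
  | cons h t ih =>
    intro b
    simp only [List.foldl_cons, pvStep]
    by_cases hlt : pvLexLt h b = true
    · rw [if_pos hlt]
      obtain ⟨p, hp, hmem, hle, hall⟩ := ih h
      refine ⟨p, hp, ?_, ?_, ?_⟩
      · rcases hmem with rfl | hm
        · exact Or.inr (List.mem_cons_self ..)
        · exact Or.inr (List.mem_cons_of_mem _ hm)
      · rw [pvLexLt_true] at hlt
        rw [pvLexLt_false] at hle ⊢
        omega
      · intro q hq
        rcases List.mem_cons.mp hq with rfl | hm
        · exact hle
        · exact hall q hm
    · rw [if_neg hlt]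
      obtain ⟨p, hp, hmem, hle, hall⟩ := ih b
      refine ⟨p, hp, ?_, hle, ?_⟩
      · rcases hmem with rfl | hm
        · exact Or.inl rfl
        · exact Or.inr (List.mem_cons_of_mem _ hm)
      · intro q hq
        rcases List.mem_cons.mp hq with rfl | hm
        · have hlt' : pvLexLt q b = false := by
            rw [← Bool.not_eq_true]; exact hlt
          rw [pvLexLt_false] at hlt' hle ⊢
          omega
        · exact hall q hm

lemma pvFold_none_some (hs : List (Nat × Nat)) (q : Nat × Nat) (hq : q ∈ hs) :
    ∃ p, List.foldl pvStep none hs = some p ∧ p ∈ hs ∧ ∀ q' ∈ hs, pvLexLt q' p = false := by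
  cases hs with
  | nil => cases hq
  | cons h t =>
    simp only [List.foldl_cons, pvStep]
    obtain ⟨p, hp, hmem, hle, hall⟩ := pvFold_some t h
    refine ⟨p, hp, ?_, ?_⟩
    · rcases hmem with rfl | hm
      · exact List.mem_cons_self ..
      · exact List.mem_cons_of_mem _ hm
    · intro q' hq'
      rcases List.mem_cons.mp hq' with rfl | hm
      · exact hle
      · exact hall q' hm

-- hits of the empty dict: none
lemma pvHits_empty (lines : List String) : ∀ i, pvHits PySem.Dict.empty lines i = [] := by
  induction lines with
  | nil => intro i; rfl
  | cons l rest ih => intro i; simp [pvHits, PySem.Dict.get?_empty, ih]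

-- hits only depend on the dict through get? at the stripped lines
lemma pvHits_congr (d d' : PySem.Dict String Nat) (lines : List String) :
    ∀ (i : Nat),
      (∀ l ∈ lines, d.get? (PySem.Str.strip l) = d'.get? (PySem.Str.strip l)) →
      pvHits d lines i = pvHits d' lines i := by
  induction lines with
  | nil => intro i _; rfl
  | cons l rest ih =>
    intro i h
    simp only [pvHits, h l (List.mem_cons_self ..)]
    rw [ih (i + 1) (fun x hx => h x (List.mem_cons_of_mem _ hx))]

-- every hit points at a real line: its index is between i and i + length
lemma pvHits_ub (d : PySem.Dict String Nat) (lines : List String) :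
    ∀ (i r j : Nat),
      (r, j) ∈ pvHits d lines i → i ≤ j ∧ j < i + lines.length := by
  induction lines with
  | nil => intro i r j h; cases h
  | cons l rest ih =>
    intro i r j h
    simp only [pvHits, List.mem_append] at h
    rcases h with h | h
    · rcases hg : d.get? (PySem.Str.strip l) with _ | r' <;> rw [hg] at h
      · cases h
      · simp at h; obtain ⟨_, rfl⟩ := h; simp
    · have := ih (i + 1) r j h; simp only [List.length_cons]; omega

-- a hit of A's scan is a hit of B's list
lemma pvBridge_mem (d : PySem.Dict String Nat) (k : String) (r : Nat) (hk : d.get? k = some r)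
    (lines : List String) :
    ∀ (i n : Nat),
      pvScanLines lines k i = some n → (r, n) ∈ pvHits d lines i := by
  induction lines with
  | nil => intro i n h; cases h
  | cons l rest ih =>
    intro i n h
    simp only [pvScanLines] at h
    simp only [pvHits, List.mem_append]
    split at h
    · cases h
      left
      rename_i he; rw [he, hk]; simp
    · right; exact ih (i + 1) n h

-- every hit comes from a scan hit of some marker with that rank, at or before it
lemma pvHits_exists_scan (d : PySem.Dict String Nat) (lines : List String) :
    ∀ (i r j : Nat),
      (r, j) ∈ pvHits d lines i →
      ∃ k n, d.get? k = some r ∧ pvScanLines lines k i = some n ∧ n ≤ j := by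
  induction lines with
  | nil => intro i r j h; cases h
  | cons l rest ih =>
    intro i r j h
    simp only [pvHits, List.mem_append] at h
    rcases h with h | h
    · rcases hg : d.get? (PySem.Str.strip l) with _ | r' <;> rw [hg] at h
      · cases h
      · rw [List.mem_singleton, Prod.mk.injEq] at h
        exact ⟨PySem.Str.strip l, i, by rw [h.1]; exact hg, by simp [pvScanLines], by omega⟩
    · obtain ⟨k, n, hk, hs, hn⟩ := ih (i + 1) r j h
      by_cases he : PySem.Str.strip l = k
      · refine ⟨k, i, hk, by simp [pvScanLines, he], ?_⟩
        have := pvHits_ub d rest (i + 1) r j h; omega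
      · exact ⟨k, n, hk, by simp [pvScanLines, he, hs], by omega⟩

-- scan misses exactly when no line strips to the marker
lemma pvScan_none_iff (k : String) (lines : List String) :
    ∀ (i : Nat),
      pvScanLines lines k i = none ↔ ∀ l ∈ lines, PySem.Str.strip l ≠ k := by
  induction lines with
  | nil => intro i; simp [pvScanLines]
  | cons l rest ih =>
    intro i
    simp only [pvScanLines]
    split
    · simp_all
    · rw [ih (i + 1)]; simp_all

-- a hit of A's inner scan is a real line number
lemma pvScanLines_lt (lines : List String) (k : String) :
    ∀ (i n : Nat), pvScanLines lines k i = some n → n < i + lines.length := by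
  induction lines with
  | nil => intro i n h; simp [pvScanLines] at h
  | cons l rest ih =>
    intro i n h
    simp only [pvScanLines] at h
    split at h
    · cases h; simp
    · have := ih (i + 1) n h; simp at this ⊢; omega

-- pvFindRank values are at least the base
lemma pvFindRank_lb (secs : List String) : ∀ (b : Nat) (k : String) (v : Nat),
    pvFindRank secs b k = some v → b ≤ v := by
  induction secs with
  | nil => intro b k v h; cases h
  | cons s rest ih =>
    intro b k v h
    simp only [pvFindRank] at h
    split at h
    · cases h; exact le_refl _
    · have := ih (b + 1) k v h; omega

-- a marker absent from the section list has no rank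
lemma pvFindRank_none_of_not_mem (k : String) (secs : List String) :
    ∀ (b : Nat), k ∉ secs.map (fun s => "## " ++ s) → pvFindRank secs b k = none := by
  induction secs with
  | nil => intro b _; rfl
  | cons s rest ih =>
    intro b h
    simp only [List.map_cons, List.mem_cons] at h
    rw [not_or] at h
    have hne : ¬ ("## " ++ s) = k := fun he => h.1 he.symm
    simp only [pvFindRank, if_neg hne]
    exact ih (b + 1) h.2

-- get? of B's rank dict, built on top of d0, via pvFindRank (needs distinct markers)
lemma pvBuildRank_get (k : String) (secs : List String) :
    ∀ (b : Nat) (d0 : PySem.Dict String Nat),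
      (secs.map (fun s => "## " ++ s)).Nodup →
      (pvBuildRank secs b d0).get? k =
        (match pvFindRank secs b k with
         | some v => some v
         | none => d0.get? k) := by
  induction secs with
  | nil => intro b d0 _; rfl
  | cons s rest ih =>
    intro b d0 hnd
    simp only [List.map_cons, List.nodup_cons] at hnd
    simp only [pvBuildRank, pvFindRank]
    rw [ih (b + 1) _ hnd.2]
    rcases hf : pvFindRank rest (b + 1) k with _ | v
    · simp only [PySem.Dict.get?_insert]
      by_cases he : ("## " ++ s) = k
      · rw [if_pos he, if_pos he.symm]
      · rw [if_neg he, if_neg (fun h => he h.symm)]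
    · rw [if_neg ?hne]
      case hne =>
        intro he
        have : pvFindRank rest (b + 1) k = none :=
          pvFindRank_none_of_not_mem k rest (b + 1) (he ▸ hnd.1)
        rw [this] at hf; cases hf

-- THE BRIDGE: A's ordered search equals B's minimal-pair selection
lemma pvMain_bridge (lines : List String) (secs : List String) :
    ∀ (b : Nat),
      (secs.map (fun s => "## " ++ s)).Nodup →
      pvOuterA lines secs lines.length =
        (match List.foldl pvStep none (pvHits (pvBuildRank secs b PySem.Dict.empty) lines 0) with
         | none => lines.length
         | some p => p.2) := by
  induction secs with
  | nil =>
    intro b _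
    simp [pvOuterA, pvBuildRank, pvHits_empty]
  | cons s rest ih =>
    intro b hnd
    have hnd' := hnd
    simp only [List.map_cons, List.nodup_cons] at hnd'
    set m := "## " ++ s with hm
    set d := pvBuildRank rest (b + 1) (PySem.Dict.empty.insert m b) with hd
    have hdget : ∀ k, d.get? k =
        (match pvFindRank rest (b + 1) k with
         | some v => some v
         | none => if k = m then some b else none) := by
      intro k
      rw [hd, pvBuildRank_get k rest (b + 1) _ hnd'.2]
      rcases pvFindRank rest (b + 1) k with _ | v
      · simp [PySem.Dict.get?_insert, PySem.Dict.get?_empty]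
      · rfl
    rcases hscan : pvScanLines lines m 0 with _ | n
    · -- marker of s absent: A recurses; B's hits are those of the tail dict
      have hstep : pvOuterA lines (s :: rest) lines.length = pvOuterA lines rest lines.length := by
        simp only [pvOuterA, ← hm, hscan]
        simp
      rw [hstep]
      have habs : ∀ l ∈ lines, PySem.Str.strip l ≠ m := (pvScan_none_iff m lines 0).mp hscan
      have hcong : pvHits (pvBuildRank (s :: rest) b PySem.Dict.empty) lines 0
          = pvHits (pvBuildRank rest (b + 1) PySem.Dict.empty) lines 0 := by
        have hdl : pvBuildRank (s :: rest) b PySem.Dict.empty = d := rfl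
        rw [hdl]
        apply pvHits_congr
        intro l hl
        rw [hdget, pvBuildRank_get _ rest (b + 1) _ hnd'.2]
        rcases pvFindRank rest (b + 1) (PySem.Str.strip l) with _ | v
        · rw [if_neg (habs l hl), PySem.Dict.get?_empty]
        · rfl
      rw [hcong]
      exact ih (b + 1) hnd'.2
    · -- marker of s present at line n: A returns n; B's minimum is (b, n)
      have hn : n < lines.length := by
        have := pvScanLines_lt lines m 0 n hscan; omega
      have hstep : pvOuterA lines (s :: rest) lines.length = n := by
        simp only [pvOuterA, ← hm, hscan]
        simp [hn]
      rw [hstep]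
      have hgm : d.get? m = some b := by
        rw [hdget]
        have : pvFindRank rest (b + 1) m = none :=
          pvFindRank_none_of_not_mem m rest (b + 1) hnd'.1
        rw [this]; simp
      have hdl : pvBuildRank (s :: rest) b PySem.Dict.empty = d := rfl
      rw [hdl]
      have hmem : (b, n) ∈ pvHits d lines 0 := pvBridge_mem d m b hgm lines 0 n hscan
      obtain ⟨p, hp, hpmem, hall⟩ := pvFold_none_some _ _ hmem
      rw [hp]
      -- p.1 = b and p.2 ≤ n from minimality against (b, n)
      have hlt := hall (b, n) hmem
      rw [pvLexLt_false] at hlt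
      -- the dict only holds values ≥ b, and value b only at key m
      obtain ⟨k, n', hk, hs', hn'⟩ := pvHits_exists_scan d lines 0 p.1 p.2 (by simpa using hpmem)
      simp at hlt
      have hge : b ≤ p.1 := by
        rw [hdget] at hk
        rcases hf : pvFindRank rest (b + 1) k with _ | v <;> rw [hf] at hk
        · by_cases hkm' : k = m
          · rw [if_pos hkm'] at hk; injection hk with h'; omega
          · rw [if_neg hkm'] at hk; cases hk
        · injection hk with h'
          have := pvFindRank_lb rest (b + 1) k _ hf; omega
      have hp1 : p.1 = b := by omega
      have hp2n : p.2 ≤ n := by omega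
      have hkm : k = m := by
        rw [hdget] at hk
        rcases hf : pvFindRank rest (b + 1) k with _ | v <;> rw [hf] at hk
        · by_cases hkm' : k = m
          · exact hkm'
          · rw [if_neg hkm'] at hk; cases hk
        · exfalso
          injection hk with h'
          have := pvFindRank_lb rest (b + 1) k _ hf; omega
      rw [hkm, hscan] at hs'
      injection hs' with hs''
      exact (by omega : n = p.2)

-- A's outer loop never moves the index past the end
lemma pvOuterA_le (lines : List String) :
    ∀ (secs : List String) (idx : Nat), idx ≤ lines.length →
      pvOuterA lines secs idx ≤ lines.length := by
  intro secs
  induction secs with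
  | nil => intro idx h; exact h
  | cons s rest ih =>
    intro idx h
    simp only [pvOuterA]
    rcases hs : pvScanLines lines ("## " ++ s) 0 with _ | n
    · simp only []
      by_cases hlt : idx < lines.length
      · rw [if_pos hlt]; exact h
      · rw [if_neg hlt]; exact ih idx h
    · have hn : n < lines.length := by
        have := pvScanLines_lt lines ("## " ++ s) 0 n hs; omega
      simp only [if_pos hn]
      omega

-- A's three list.insert calls at idx, idx+1, idx+2 build B's take/drop splice
lemma pvInserts_eq (xs : List String) (t : String) (idx : Nat) (h : idx ≤ xs.length) :
    PySem.List.insert (PySem.List.insert (PySem.List.insert xs (idx : Int) "")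
        ((idx : Int) + 1) t) ((idx : Int) + 2) ""
      = xs.take idx ++ ["", t, ""] ++ xs.drop idx := by
  obtain ⟨ys, zs, hxs, hy⟩ : ∃ ys zs, xs = ys ++ zs ∧ ys.length = idx :=
    ⟨xs.take idx, xs.drop idx, (List.take_append_drop idx xs).symm,
     by rw [List.length_take]; omega⟩
  subst hxs
  rw [← hy]
  rw [PySem.List.insert_natCast (ys ++ zs) ys.length "" (by simp)]
  rw [List.take_left, List.drop_left]
  have s1 : ys ++ "" :: zs = (ys ++ [""]) ++ zs := by simp
  have h1 : ((ys.length : Int) + 1) = (((ys ++ [""]).length : Nat) : Int) := by simp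
  rw [s1, h1, PySem.List.insert_natCast ((ys ++ [""]) ++ zs) (ys ++ [""]).length t (by simp)]
  rw [List.take_left, List.drop_left]
  have s2 : (ys ++ [""]) ++ t :: zs = (ys ++ ["", t]) ++ zs := by simp
  have h2 : ((ys.length : Int) + 2) = (((ys ++ ["", t]).length : Nat) : Int) := by simp
  rw [s2, h2, PySem.List.insert_natCast ((ys ++ ["", t]) ++ zs) (ys ++ ["", t]).length "" (by simp)]
  rw [List.take_left, List.drop_left]
  simp

-- the markers of any suffix of the section order are distinct
lemma pvSectionOrder_markers_nodup (k : Nat) :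
    (((pvSectionOrder.drop k)).map (fun s => "## " ++ s)).Nodup := by
  exact (by decide : (pvSectionOrder.map (fun s => "## " ++ s)).Nodup).sublist
    ((List.drop_sublist k _).map _)

-- ===== VERDICT (by name: the statement is the Claim_ definition above) =====
theorem add_section_to_spec_py_spec : Claim_equal_add_section_to_spec_py := by
  intro content section_name section_template _
  unfold Spec_add_section_to_spec_py add_section_to_spec_py add_section_to_spec_py_alt
  simp only []
  set lines := (PySem.Str.split? content "\n").getD [] with hlines
  rcases hix : PySem.List.index? pvSectionOrder section_name with _ | si
  · simp only [pvBestScan_eq_fold, pvHits_empty, List.foldl_nil]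
    rw [pvInserts_eq lines section_template lines.length le_rfl]
  · simp only [pvBestScan_eq_fold]
    have hbridge := pvMain_bridge lines (pvSectionOrder.drop (si + 1)) 0
      (pvSectionOrder_markers_nodup (si + 1))
    rw [pvInserts_eq lines section_template _
      (pvOuterA_le lines (pvSectionOrder.drop (si + 1)) lines.length le_rfl)]
    rw [hbridge]
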